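-- pv_equiv track=rewrite | github.com/ZiJie-Duan/Subtitle-Generator | src/core.py | match_sentence
-- ===== SOURCE A (Python) =====
-- def levenshtein_distance(s1, s2):
--     if len(s1) < len(s2):
--         return levenshtein_distance(s2, s1)
--
--     if len(s2) == 0:
--         return len(s1)
--
--     previous_row = range(len(s2) + 1)
--     for i, c1 in enumerate(s1):
--         current_row = [i + 1]
--         for j, c2 in enumerate(s2):
--             insertions = previous_row[j + 1] + 1
--             deletions = current_row[j] + 1
--             substitutions = previous_row[j] + (c1 != c2)
--             current_row.append(min(insertions, deletions, substitutions))
--         previous_row = current_row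
--
--     return previous_row[-1]
--
-- def match_sentence(short_sentence, word_list):
--     short_sentence = short_sentence.replace(" ", "")
--     min_dis = 9999999
--     match_index = None
--
--     for i in range(0, len(word_list)):
--         dis = levenshtein_distance(short_sentence, "".join(word_list[0 : i + 1]))
--         if dis <= min_dis:
--             min_dis = dis
--             match_index = i
--
--     return match_index, "".join(word_list[0 : match_index + 1])
-- ===== SOURCE B (Python) =====
-- def match_sentence(short_sentence, word_list):
--     # One incremental edit-distance DP over the growing concatenation of word_list;
--     # the distance to each prefix is read off at every word boundary (A recomputes a
--     # full DP per prefix).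
--     s = short_sentence.replace(" ", "")
--     n = len(s)
--     row = list(range(n + 1))          # row[k] = dist(text consumed so far, s[:k])
--     consumed = 0
--     min_dis = 9999999
--     match_index = None
--     for i, word in enumerate(word_list):
--         for c in word:
--             consumed += 1
--             new_row = [consumed]
--             for k in range(n):
--                 new_row.append(min(row[k + 1] + 1, new_row[k] + 1, row[k] + (c != s[k])))
--             row = new_row
--         if row[n] <= min_dis:         # distance of sentence to words[0..i] joined
--             min_dis = row[n]
--             match_index = i
--     return match_index, "".join(word_list[:match_index + 1])
-- ===== Notes on version B (the rewrite author's own statement) =====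
-- stated objective: faster
-- what changed: B runs a single incremental edit-distance DP over the growing concatenation of word_list and reads the distance off at every word boundary, instead of recomputing a full Levenshtein DP from scratch for each prefix as A does; the running-minimum bookkeeping (9999999 start, <=) is kept identical, so B returns A's exact value wherever A returns.
import Mathlib
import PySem

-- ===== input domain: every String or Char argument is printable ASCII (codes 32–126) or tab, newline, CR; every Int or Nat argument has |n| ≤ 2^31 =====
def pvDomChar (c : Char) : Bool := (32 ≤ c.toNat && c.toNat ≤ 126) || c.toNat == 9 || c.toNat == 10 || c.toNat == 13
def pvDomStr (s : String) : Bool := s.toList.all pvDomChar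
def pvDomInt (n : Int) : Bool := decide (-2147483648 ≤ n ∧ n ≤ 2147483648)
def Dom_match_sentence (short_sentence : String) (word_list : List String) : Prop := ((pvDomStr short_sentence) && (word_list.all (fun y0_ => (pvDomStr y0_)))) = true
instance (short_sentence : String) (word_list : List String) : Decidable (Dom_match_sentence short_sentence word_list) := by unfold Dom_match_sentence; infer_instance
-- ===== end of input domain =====

-- B replaces A's per-prefix full Levenshtein DP by one incremental DP over the growing
-- concatenation, reading the distance at each word boundary (measured faster; same results).


-- ===== PORT A =====
def levenshtein_distance (s1 s2 : List Char) : Int :=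
  if s1.length < s2.length then levenshtein_distance s2 s1
  else if s2.length = 0 then (s1.length : Int)
  else
    let final :=
      (PySem.List.enumerate s1).foldl (fun previous_row ic =>
        (PySem.List.enumerate s2).foldl (fun current_row jc =>
          let insertions := PySem.List.pyGetD previous_row (jc.1 + 1) 0 + 1
          let deletions := PySem.List.pyGetD current_row jc.1 0 + 1
          let substitutions := PySem.List.pyGetD previous_row jc.1 0 + (if ic.2 ≠ jc.2 then 1 else 0)
          current_row ++ [min insertions (min deletions substitutions)])
          [ic.1 + 1])
        (PySem.List.pyRange 0 ((s2.length : Int) + 1))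
    PySem.List.pyGetD final (-1) 0
termination_by (if s1.length < s2.length then 1 else 0)
decreasing_by
  rename_i h
  simp only [if_pos h, if_neg (by omega : ¬ s2.length < s1.length)]
  omega

def match_sentence (short_sentence : String) (word_list : List String) : Option Int × String :=
  let ss := PySem.Str.replace short_sentence " " ""
  let st := (PySem.List.pyRange 0 ((word_list.length : Int))).foldl
    (fun (st : Int × Option Int) i =>
      let dis := levenshtein_distance ss.toList
        (PySem.Str.join "" (PySem.List.slice word_list (some 0) (some (i + 1)))).toList
      if dis ≤ st.1 then (dis, some i) else st)
    ((9999999 : Int), (none : Option Int))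
  match st.2 with
  | some match_index =>
      (some match_index, PySem.Str.join "" (PySem.List.slice word_list (some 0) (some (match_index + 1))))
  | none => (none, "")  -- Python raises TypeError (None + 1) here; excluded by Pre_

-- ===== PORT B =====
def match_sentence_alt (short_sentence : String) (word_list : List String) : Option Int × String :=
  let s := (PySem.Str.replace short_sentence " " "").toList
  let n := s.length
  let st :=
    (PySem.List.enumerate word_list).foldl
      (fun (st : List Int × Int × Int × Option Int) iw =>
        let rc := iw.2.toList.foldl
          (fun (rc : List Int × Int) c =>
            let consumed := rc.2 + 1
            let new_row :=
              (PySem.List.pyRange 0 (n : Int)).foldl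
                (fun new_row k =>
                  new_row ++ [min (PySem.List.pyGetD rc.1 (k + 1) 0 + 1)
                    (min (PySem.List.pyGetD new_row k 0 + 1)
                         (PySem.List.pyGetD rc.1 k 0 + (if c ≠ PySem.List.pyGetD s k ' ' then 1 else 0)))])
                [consumed]
            (new_row, consumed))
          (st.1, st.2.1)
        let d := PySem.List.pyGetD rc.1 (n : Int) 0
        if d ≤ st.2.2.1 then (rc.1, rc.2, d, some iw.1)
        else (rc.1, rc.2, st.2.2.1, st.2.2.2))
      (PySem.List.pyRange 0 ((n : Int) + 1), 0, 9999999, none)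
  match st.2.2.2 with
  | some match_index =>
      (some match_index, PySem.Str.join "" (PySem.List.slice word_list none (some (match_index + 1))))
  | none => (none, "")  -- Python raises TypeError (None + 1) here; excluded by Pre_

-- ===== PRECONDITION & SPEC =====
-- Pre_ excludes only the empty word_list, on which A raises TypeError (word_list[0:None+1]).
def Pre_match_sentence (short_sentence : String) (word_list : List String) : Prop :=
  word_list ≠ []
instance (short_sentence : String) (word_list : List String) : Decidable (Pre_match_sentence short_sentence word_list) := by unfold Pre_match_sentence; infer_instance
def pvWitness_match_sentence : String × List String := ("ab c", ["ab", "cd"])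

def Spec_match_sentence (short_sentence : String) (word_list : List String) (out : Option Int × String) : Prop := out = match_sentence_alt short_sentence word_list
instance (short_sentence : String) (word_list : List String) (out : Option Int × String) : Decidable (Spec_match_sentence short_sentence word_list out) := by unfold Spec_match_sentence; infer_instance

-- ===== CLAIM (what is proved, stated in full; the proofs are below) =====
def Claim_equal_match_sentence : Prop := ∀ (short_sentence : String) (word_list : List String), Dom_match_sentence short_sentence word_list → Pre_match_sentence short_sentence word_list → Spec_match_sentence short_sentence word_list (match_sentence short_sentence word_list)

-- ===== LEMMAS AND PROOFS =====

def lev : List Char → List Char → Nat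
  | [], ys => ys.length
  | _ :: xs, [] => xs.length + 1
  | x :: xs, y :: ys =>
      min (min (lev xs (y :: ys) + 1) (lev (x :: xs) ys + 1))
          (lev xs ys + (if x = y then 0 else 1))
termination_by s1 s2 => (s1.length, s2.length)
lemma lev_nil_right (xs : List Char) : lev xs [] = xs.length := by cases xs <;> simp [lev]
def rowOf (ra ys : List Char) : List Int :=
  (List.range (ys.length + 1)).map (fun j => ((lev ra ((ys.take j).reverse) : Nat) : Int))
def rowStep (prev : List Int) (c : Char) (ys : List Char) (init : Int) : List Int :=
  (PySem.List.pyRange 0 ((ys.length : Int))).foldl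
    (fun new_row k =>
      new_row ++ [min (PySem.List.pyGetD prev (k + 1) 0 + 1)
        (min (PySem.List.pyGetD new_row k 0 + 1)
             (PySem.List.pyGetD prev k 0 + (if c ≠ PySem.List.pyGetD ys k ' ' then 1 else 0)))])
    [init]

lemma rowStep_aux (ra ys : List Char) (c : Char) : ∀ (t : Nat), t ≤ ys.length →
    (PySem.List.pyRange 0 ((t : Int))).foldl
      (fun new_row k =>
        new_row ++ [min (PySem.List.pyGetD (rowOf ra ys) (k + 1) 0 + 1)
          (min (PySem.List.pyGetD new_row k 0 + 1)
               (PySem.List.pyGetD (rowOf ra ys) k 0 + (if c ≠ PySem.List.pyGetD ys k ' ' then 1 else 0)))])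
      [(ra.length : Int) + 1]
    = (List.range (t + 1)).map (fun j => ((lev (c :: ra) ((ys.take j).reverse) : Nat) : Int)) := by
  intro t
  induction t with
  | zero =>
    intro _
    simp [lev_nil_right]
  | succ t ih =>
    intro ht
    have ht' : t ≤ ys.length := by omega
    have htlt : t < ys.length := by omega
    have hcast : ((t : Nat) + 1 : Int) = ((t : Int) + 1) := by norm_num
    rw [show ((t + 1 : Nat) : Int) = (t : Int) + 1 by push_cast; ring,
        PySem.List.pyRange_one_succ_right (by positivity), List.foldl_append, ih ht']
    simp only [List.foldl_cons, List.foldl_nil]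
    -- evaluate the four lookups
    have hcur : PySem.List.pyGetD ((List.range (t + 1)).map (fun j => ((lev (c :: ra) ((ys.take j).reverse) : Nat) : Int))) ((t : Int)) 0
        = ((lev (c :: ra) ((ys.take t).reverse) : Nat) : Int) := by
      rw [PySem.List.pyGetD_natCast, PySem.List.getD_map_range _ _ _ _ (by omega)]
    have hprev1 : PySem.List.pyGetD (rowOf ra ys) ((t : Int) + 1) 0
        = ((lev ra ((ys.take (t + 1)).reverse) : Nat) : Int) := by
      rw [show ((t : Int) + 1) = (((t + 1 : Nat)) : Int) by push_cast; ring,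
          PySem.List.pyGetD_natCast]
      unfold rowOf
      rw [PySem.List.getD_map_range _ _ _ _ (by omega)]
    have hprev0 : PySem.List.pyGetD (rowOf ra ys) ((t : Int)) 0
        = ((lev ra ((ys.take t).reverse) : Nat) : Int) := by
      rw [PySem.List.pyGetD_natCast]
      unfold rowOf
      rw [PySem.List.getD_map_range _ _ _ _ (by omega)]
    have hys : PySem.List.pyGetD ys ((t : Int)) ' ' = ys[t] := by
      rw [PySem.List.pyGetD_natCast, List.getD_eq_getElem _ _ htlt]
    rw [hcur, hprev1, hprev0, hys]
    rw [List.range_succ (n := t + 1), List.map_append]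
    congr 1
    have htake : ys.take (t + 1) = ys.take t ++ [ys[t]] := by
      rw [List.take_add_one, List.getElem?_eq_getElem htlt]; rfl
    have hrev : (ys.take (t + 1)).reverse = ys[t] :: (ys.take t).reverse := by
      rw [htake]; simp
    simp only [List.map_cons, List.map_nil, hrev, lev]
    congr 1
    have : (if c = ys[t] then 0 else 1 : Nat) = (if c ≠ ys[t] then 1 else 0 : Nat) := by
      by_cases h : c = ys[t] <;> simp [h]
    push_cast [this]
    by_cases h : c = ys[t]
    · simp [h]
      omega
    · simp [h]

lemma rowStep_rowOf (ra ys : List Char) (c : Char) :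
    rowStep (rowOf ra ys) c ys ((ra.length : Int) + 1) = rowOf (c :: ra) ys := by
  unfold rowStep
  rw [rowStep_aux ra ys c ys.length le_rfl]
  rfl

lemma enum_fold_eq_rowStep (prev : List Int) (c : Char) (ys : List Char) (init : Int) :
    (PySem.List.enumerate ys).foldl
      (fun current_row jc =>
        current_row ++ [min (PySem.List.pyGetD prev (jc.1 + 1) 0 + 1)
          (min (PySem.List.pyGetD current_row jc.1 0 + 1)
               (PySem.List.pyGetD prev jc.1 0 + (if c ≠ jc.2 then 1 else 0)))])
      [init]
    = rowStep prev c ys init := by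
  rw [PySem.List.enumerate_eq_map_pyRange ys ' ', List.foldl_map]
  unfold rowStep
  rw [PySem.List.len_eq]

lemma A_rows (ys : List Char) : ∀ (zs ra : List Char),
    (PySem.List.enumerate zs ((ra.length : Int))).foldl
      (fun previous_row ic =>
        (PySem.List.enumerate ys).foldl (fun current_row jc =>
          current_row ++ [min (PySem.List.pyGetD previous_row (jc.1 + 1) 0 + 1)
            (min (PySem.List.pyGetD current_row jc.1 0 + 1)
                 (PySem.List.pyGetD previous_row jc.1 0 + (if ic.2 ≠ jc.2 then 1 else 0)))])
          [ic.1 + 1])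
      (rowOf ra ys)
    = rowOf (zs.reverse ++ ra) ys := by
  intro zs
  induction zs with
  | nil => intro ra; simp [PySem.List.enumerate]
  | cons z zs ih =>
    intro ra
    rw [PySem.List.enumerate_cons, List.foldl_cons]
    have h1 : ((ra.length : Int) + 1) = (((z :: ra).length : Nat) : Int) := by simp
    rw [enum_fold_eq_rowStep (rowOf ra ys) z ys, rowStep_rowOf, h1, ih (z :: ra)]
    simp

lemma rowOf_init (ys : List Char) :
    PySem.List.pyRange 0 ((ys.length : Int) + 1) = rowOf ([] : List Char) ys := by
  unfold rowOf
  rw [show ((ys.length : Int) + 1) = (((ys.length + 1 : Nat)) : Int) by push_cast; ring,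
      PySem.List.pyRange_zero_natCast]
  apply List.map_congr_left
  intro j hj
  rw [List.mem_range] at hj
  simp [lev]
  omega

lemma rowOf_last (ra ys : List Char) :
    PySem.List.pyGetD (rowOf ra ys) (-1) 0 = ((lev ra ys.reverse : Nat) : Int) := by
  unfold PySem.List.pyGetD
  rw [PySem.List.pyGet?_neg_one]
  unfold rowOf
  rw [List.range_succ, List.map_append]
  simp

lemma rowOf_read (ra ys : List Char) :
    PySem.List.pyGetD (rowOf ra ys) ((ys.length : Int)) 0 = ((lev ra ys.reverse : Nat) : Int) := by
  rw [PySem.List.pyGetD_natCast]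
  unfold rowOf
  rw [PySem.List.getD_map_range _ _ _ _ (by omega)]
  simp

lemma levA_eq_of_ge (s1 s2 : List Char) (h : ¬ s1.length < s2.length) :
    levenshtein_distance s1 s2 = ((lev s1.reverse s2.reverse : Nat) : Int) := by
  rw [levenshtein_distance]
  rw [if_neg h]
  by_cases h2 : s2.length = 0
  · rw [if_pos h2]
    have : s2 = [] := List.length_eq_zero_iff.mp h2
    subst this
    simp [lev_nil_right]
  · rw [if_neg h2]
    simp only []
    rw [rowOf_init s2]
    have := A_rows s2 s1 []
    simp only [List.length_nil, Nat.cast_zero] at this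
    rw [this, List.append_nil, rowOf_last]

lemma lev_comm (xs : List Char) : ∀ ys, lev xs ys = lev ys xs := by
  induction xs with
  | nil => intro ys; simp [lev, lev_nil_right]
  | cons x xs ihx =>
    intro ys
    induction ys with
    | nil => simp [lev, lev_nil_right]
    | cons y ys ihy =>
      simp only [lev]
      rw [ihx (y :: ys), ihx ys, ← ihy]
      have : (if x = y then 0 else 1) = (if y = x then 0 else 1 : Nat) := by
        by_cases h : x = y <;> simp [h, Ne.symm]
      rw [this]
      omega

lemma levA_eq (s1 s2 : List Char) :
    levenshtein_distance s1 s2 = ((lev s1.reverse s2.reverse : Nat) : Int) := by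
  by_cases h : s1.length < s2.length
  · rw [levenshtein_distance, if_pos h, levA_eq_of_ge s2 s1 (by omega), lev_comm]
  · exact levA_eq_of_ge s1 s2 h

def concatW (ws : List String) : List Char := (ws.map String.toList).flatten

lemma join_empty_sep (ps : List (List Char)) : PySem.Chars.join [] ps = ps.flatten := by
  induction ps with
  | nil => simp [PySem.Chars.join_nil]
  | cons a ps ih =>
    cases ps with
    | nil => simp [PySem.Chars.join_singleton]
    | cons b r => rw [PySem.Chars.join_cons_cons]; simp_all

lemma join_slice_toList (W : List String) (k : Nat) :
    (PySem.Str.join "" (PySem.List.slice W (some 0) (some ((k : Int) + 1)))).toList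
      = concatW (W.take (k + 1)) := by
  rw [PySem.Str.toList_join]
  have h0 : PySem.List.slice W (some 0) (some ((k : Int) + 1)) = W.take (k + 1) := by
    rw [show ((k : Int) + 1) = (((k + 1 : Nat)) : Int) by push_cast; ring,
        show ((0 : Int)) = (((0 : Nat)) : Int) by norm_num,
        PySem.List.slice_natCast]
    simp
  rw [h0]
  have : ("" : String).toList = [] := rfl
  rw [this, join_empty_sep]
  rfl

lemma B_chars (ys : List Char) : ∀ (cs ra : List Char),
    cs.foldl
      (fun (rc : List Int × Int) c => (rowStep rc.1 c ys (rc.2 + 1), rc.2 + 1))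
      (rowOf ra ys, (ra.length : Int))
    = (rowOf (cs.reverse ++ ra) ys, (((cs.reverse ++ ra).length : Nat) : Int)) := by
  intro cs
  induction cs with
  | nil => intro ra; simp
  | cons c cs ih =>
    intro ra
    rw [List.foldl_cons]
    have h1 : rowStep (rowOf ra ys) c ys ((ra.length : Int) + 1) = rowOf (c :: ra) ys :=
      rowStep_rowOf ra ys c
    simp only [h1]
    have h2 : ((ra.length : Int) + 1) = (((c :: ra).length : Nat) : Int) := by simp
    rw [h2, ih (c :: ra)]
    have : cs.reverse ++ c :: ra = (c :: cs).reverse ++ ra := by simp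
    rw [this]

lemma slice_none_eq_zero {α : Type} (W : List α) (b : Option Int) :
    PySem.List.slice W none b = PySem.List.slice W (some 0) b := by
  simp [PySem.List.slice, PySem.List.clampIdx]

lemma concat_take_succ (W : List String) (k : Nat) (z : String) (hz : W.drop k = z :: (W.drop (k+1))) :
    concatW (W.take (k + 1)) = concatW (W.take k) ++ z.toList := by
  have hk : k < W.length := by
    by_contra h
    rw [List.drop_eq_nil_of_le (by omega)] at hz
    simp at hz
  have hWk : W[k] = z := by
    have h0 : (W.drop k)[0]'(by rw [hz]; simp) = z := by simp [hz]
    rw [List.getElem_drop] at h0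
    simpa using h0
  rw [List.take_add_one, List.getElem?_eq_getElem hk]
  unfold concatW
  simp [hWk]

-- the two loop bodies, named (definitionally equal to the ports' lambdas)
def stepA (ys : List Char) (W : List String) (st : Int × Option Int) (i : Int) : Int × Option Int :=
  let dis := levenshtein_distance ys
    (PySem.Str.join "" (PySem.List.slice W (some 0) (some (i + 1)))).toList
  if dis ≤ st.1 then (dis, some i) else st

def stepB (ys : List Char) (st : List Int × Int × Int × Option Int) (iw : Int × String) :
    List Int × Int × Int × Option Int :=
  let rc := iw.2.toList.foldl
    (fun (rc : List Int × Int) c => (rowStep rc.1 c ys (rc.2 + 1), rc.2 + 1)) (st.1, st.2.1)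
  let d := PySem.List.pyGetD rc.1 ((ys.length : Int)) 0
  if d ≤ st.2.2.1 then (rc.1, rc.2, d, some iw.1)
  else (rc.1, rc.2, st.2.2.1, st.2.2.2)

lemma joint_loop (ys : List Char) (W : List String) :
    ∀ (zs : List String) (k : Nat) (m : Int) (idx : Option Int),
      W.drop k = zs →
      (let fA := (PySem.List.pyRange (k : Int) ((W.length : Int))).foldl (stepA ys W) (m, idx)
       let fB := (PySem.List.enumerate zs ((k : Int))).foldl (stepB ys)
          (rowOf ((concatW (W.take k)).reverse) ys, (((concatW (W.take k)).reverse.length : Nat) : Int),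
            m, idx)
       fB.2.2.1 = fA.1 ∧ fB.2.2.2 = fA.2) := by
  intro zs
  induction zs with
  | nil =>
    intro k m idx hdrop
    have hk : W.length ≤ k := by
      by_contra h
      have := List.drop_eq_nil_iff.mp hdrop
      omega
    rw [PySem.List.pyRange_one_eq_nil (by exact_mod_cast hk)]
    simp [PySem.List.enumerate]
  | cons z zs ih =>
    intro k m idx hdrop
    have hk : k < W.length := by
      by_contra h
      rw [List.drop_eq_nil_of_le (by omega)] at hdrop
      simp at hdrop
    have hdrop1 : W.drop (k + 1) = zs := by
      rw [List.drop_add_one_eq_tail_drop, hdrop]; rfl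
    have hconc : concatW (W.take (k + 1)) = concatW (W.take k) ++ z.toList :=
      concat_take_succ W k z (by rw [hdrop, hdrop1])
    rw [PySem.List.pyRange_one_cons (by exact_mod_cast hk), List.foldl_cons,
        PySem.List.enumerate_cons, List.foldl_cons]
    have hra : z.toList.reverse ++ (concatW (W.take k)).reverse
        = (concatW (W.take (k + 1))).reverse := by
      rw [hconc]; simp
    have hstB : stepB ys
        (rowOf ((concatW (W.take k)).reverse) ys, (((concatW (W.take k)).reverse.length : Nat) : Int),
          m, idx) (((k : Nat) : Int), z)
        = ((rowOf ((concatW (W.take (k + 1))).reverse) ys),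
            ((((concatW (W.take (k + 1))).reverse.length : Nat) : Int)),
            (if ((lev ((concatW (W.take (k + 1))).reverse) ys.reverse : Nat) : Int) ≤ m
              then ((lev ((concatW (W.take (k + 1))).reverse) ys.reverse : Nat) : Int)
              else m),
            (if ((lev ((concatW (W.take (k + 1))).reverse) ys.reverse : Nat) : Int) ≤ m
              then some ((k : Nat) : Int) else idx)) := by
      unfold stepB
      simp only []
      rw [B_chars ys z.toList ((concatW (W.take k)).reverse), hra, rowOf_read]
      by_cases h : ((lev ((concatW (W.take (k + 1))).reverse) ys.reverse : Nat) : Int) ≤ m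
      · simp only [if_pos h]
      · simp only [if_neg h]
    have hdisA : levenshtein_distance ys
        (PySem.Str.join "" (PySem.List.slice W (some 0) (some (((k : Nat) : Int) + 1)))).toList
        = ((lev ((concatW (W.take (k + 1))).reverse) ys.reverse : Nat) : Int) := by
      rw [join_slice_toList, levA_eq, lev_comm]
    have hstA : stepA ys W (m, idx) ((k : Nat) : Int)
        = (if ((lev ((concatW (W.take (k + 1))).reverse) ys.reverse : Nat) : Int) ≤ m
            then ((lev ((concatW (W.take (k + 1))).reverse) ys.reverse : Nat) : Int) else m,
           if ((lev ((concatW (W.take (k + 1))).reverse) ys.reverse : Nat) : Int) ≤ m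
            then some ((k : Nat) : Int) else idx) := by
      unfold stepA
      simp only [hdisA]
      by_cases h : ((lev ((concatW (W.take (k + 1))).reverse) ys.reverse : Nat) : Int) ≤ m
      · simp only [if_pos h]
      · simp only [if_neg h]
    rw [hstA, hstB,
        show ((k : Int) + 1) = (((k + 1 : Nat)) : Int) by push_cast; ring]
    by_cases h : ((lev ((concatW (W.take (k + 1))).reverse) ys.reverse : Nat) : Int) ≤ m
    · simp only [if_pos h]
      exact ih (k + 1) _ _ hdrop1
    · simp only [if_neg h]
      exact ih (k + 1) _ _ hdrop1

-- ===== VERDICT (by name: the statement is the Claim_ definition above) =====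
theorem match_sentence_spec : Claim_equal_match_sentence := by
  intro ss W _hdom _hpre
  unfold Spec_match_sentence
  set ys : List Char := (PySem.Str.replace ss " " "").toList with hys
  have hA : match_sentence ss W
      = (match ((PySem.List.pyRange 0 ((W.length : Int))).foldl (stepA ys W)
            ((9999999 : Int), (none : Option Int))).2 with
        | some mi => (some mi,
            PySem.Str.join "" (PySem.List.slice W (some 0) (some (mi + 1))))
        | none => (none, "")) := rfl
  have hB : match_sentence_alt ss W
      = (match ((PySem.List.enumerate W).foldl (stepB ys)
            (PySem.List.pyRange 0 (((ys.length : Int)) + 1), 0, 9999999, none)).2.2.2 with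
        | some mi => (some mi,
            PySem.Str.join "" (PySem.List.slice W none (some (mi + 1))))
        | none => (none, "")) := rfl
  rw [hA, hB]
  have key := joint_loop ys W W 0 9999999 none rfl
  simp only [] at key
  obtain ⟨_, k2⟩ := key
  have hinit : (PySem.List.enumerate W).foldl (stepB ys)
        (PySem.List.pyRange 0 (((ys.length : Int)) + 1), 0, 9999999, none)
      = (PySem.List.enumerate W ((0 : Nat) : Int)).foldl (stepB ys)
        (rowOf ((concatW (W.take 0)).reverse) ys,
          (((concatW (W.take 0)).reverse.length : Nat) : Int), 9999999, none) := by
    rw [rowOf_init]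
    norm_num [concatW, PySem.List.enumerate]
  rw [hinit, k2]
  rcases h : ((PySem.List.pyRange ((0 : Nat) : Int) ((W.length : Int))).foldl (stepA ys W)
      ((9999999 : Int), (none : Option Int))).2 with _ | mi
  · rfl
  · simp only [slice_none_eq_zero]
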